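-- pv_equiv track=rewrite | github.com/mepex/advent_of_code_2023 | Day14/main.py | shift_line
-- ===== SOURCE A (Python) =====
-- def shift_line(row):
--     # shift 0s to left, stopping at #s
--     size = len(row)
--     for i in range(0, size):
--         for j in range(0, size - i - 1):
--             a = row[j]
--             b = row[j+1]
--             if row[j] == "." and row[j + 1] == "O":
--                 row[j] = "O"
--                 row[j+1] = '.'
--     return row
-- ===== SOURCE B (Python) =====
-- def shift_line(row):
--     # One pass: count "O"s and "."s per segment between barriers, emit packed.
--     # Mutates row in place (like the original) and returns it.
--     out = []
--     o = d = 0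
--     for c in row:
--         if c == "O":
--             o += 1
--         elif c == ".":
--             d += 1
--         else:
--             out += ["O"] * o + ["."] * d + [c]
--             o = 0
--             d = 0
--     row[:] = out + ["O"] * o + ["."] * d
--     return row
-- ===== Notes on version B (the rewrite author's own statement) =====
-- stated objective: faster
-- what changed: Replaces A's O(n^2) double bubble loop with a single pass that counts "O"s and "."s per segment between non-rock cells and emits each segment packed.
import Mathlib
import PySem

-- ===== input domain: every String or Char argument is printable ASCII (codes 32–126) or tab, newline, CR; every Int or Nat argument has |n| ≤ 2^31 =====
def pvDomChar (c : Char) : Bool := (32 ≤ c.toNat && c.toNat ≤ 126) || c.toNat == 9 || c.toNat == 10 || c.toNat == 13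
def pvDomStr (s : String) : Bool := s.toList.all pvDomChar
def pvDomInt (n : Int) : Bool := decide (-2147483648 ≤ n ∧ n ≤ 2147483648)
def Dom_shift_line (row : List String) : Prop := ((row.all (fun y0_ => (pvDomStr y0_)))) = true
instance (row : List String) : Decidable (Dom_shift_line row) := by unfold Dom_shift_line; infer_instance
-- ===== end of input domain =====

-- B replaces A's O(n^2) bubbling with one O(n) pass counting "O"s/"."s per
-- barrier-bounded segment; both Pythons mutate `row` in place the same way,
-- the theorem is about the returned value.

-- ===== PORT A =====
-- one inner-loop step: compare row[j], row[j+1], swap "." "O" -> "O" "."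
def stepA (r : List String) (j : Nat) : List String :=
  if r.getD j "" = "." ∧ r.getD (j + 1) "" = "O" then
    (r.set j "O").set (j + 1) "."
  else r

def shift_line (row : List String) : List String :=
  let size := row.length
  (List.range size).foldl
    (fun r i => (List.range (size - i - 1)).foldl (fun r j => stepA r j) r) row

-- ===== PORT B =====
-- fold state: (finished output, pending "O" count, pending "." count)
def gB (s : List String × Nat × Nat) (c : String) : List String × Nat × Nat :=
  if c = "O" then (s.1, s.2.1 + 1, s.2.2)
  else if c = "." then (s.1, s.2.1, s.2.2 + 1)
  else (s.1 ++ List.replicate s.2.1 "O" ++ List.replicate s.2.2 "." ++ [c], 0, 0)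

def shift_line_alt (row : List String) : List String :=
  let s := row.foldl gB ([], 0, 0)
  s.1 ++ List.replicate s.2.1 "O" ++ List.replicate s.2.2 "."

-- ===== PRECONDITION & SPEC =====
def Spec_shift_line (row : List String) (out : List String) : Prop := out = shift_line_alt row
instance (row : List String) (out : List String) : Decidable (Spec_shift_line row out) := by unfold Spec_shift_line; infer_instance

-- ===== CLAIM (what is proved, stated in full; the proofs are below) =====
def Claim_equal_shift_line : Prop := ∀ (row : List String), Dom_shift_line row → Spec_shift_line row (shift_line row)

-- ===== LEMMAS AND PROOFS =====

-- structural version of one bubble pass over a whole list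
def bp : List String → List String
  | [] => []
  | [a] => [a]
  | a :: b :: t => if a = "." ∧ b = "O" then "O" :: bp ("." :: t) else a :: bp (b :: t)
termination_by l => l.length

-- insert one "." after the leading "O"s
def insertDot : List String → List String
  | [] => ["."]
  | c :: u => if c = "O" then "O" :: insertDot u else "." :: c :: u

-- segment normal form: per "#"-bounded segment, all "O"s then all "."s
def saltR : List String → List String
  | [] => []
  | c :: t => if c = "O" then "O" :: saltR t
              else if c = "." then insertDot (saltR t)
              else c :: saltR t

def iterDot : Nat → List String → List String
  | 0, u => u
  | d + 1, u => insertDot (iterDot d u)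

theorem stepA_cons (c : String) (z : List String) (j : Nat) :
    stepA (c :: z) (j + 1) = c :: stepA z j := by
  simp [stepA, List.getD_cons_succ]
  split_ifs <;> simp

theorem stepA_oob (r : List String) (j : Nat) (h : r.length ≤ j + 1) :
    stepA r j = r := by
  have hd : r.getD (j + 1) "" = "" := List.getD_eq_default _ _ (by omega)
  have hfalse : ¬(r.getD j "" = "." ∧ r.getD (j + 1) "" = "O") := by
    rw [hd]; simp
  simp only [stepA, if_neg hfalse]

theorem stepA_append (z rest : List String) (j : Nat) (h : j + 2 ≤ z.length) :
    stepA (z ++ rest) j = stepA z j ++ rest := by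
  have h1 : (z ++ rest).getD j "" = z.getD j "" := by
    simp [List.getD_eq_getElem?_getD, List.getElem?_append_left (by omega : j < z.length)]
  have h2 : (z ++ rest).getD (j + 1) "" = z.getD (j + 1) "" := by
    simp [List.getD_eq_getElem?_getD, List.getElem?_append_left (by omega : j + 1 < z.length)]
  simp only [stepA, h1, h2]
  split_ifs with hc
  · rw [List.set_append_left _ _ (by omega), List.set_append_left _ _ (by simpa using by omega)]
  · rfl

theorem bp_length (l : List String) : (bp l).length = l.length := by
  fun_induction bp <;> simp_all

theorem bp_ne_nil (l : List String) (h : l ≠ []) : bp l ≠ [] := by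
  intro hb
  apply h
  have := bp_length l
  rw [hb] at this
  exact List.eq_nil_of_length_eq_zero this.symm

theorem bp_snoc (u : List String) (y : String) (h : u ≠ []) :
    bp (u ++ [y]) = stepA (bp u ++ [y]) (u.length - 1) := by
  fun_induction bp u with
  | case1 => exact absurd rfl h
  | case2 a =>
      show bp [a, y] = stepA [a, y] 0
      by_cases hc : a = "." ∧ y = "O"
      · obtain ⟨h1, h2⟩ := hc; subst h1; subst h2; simp [bp, stepA]
      · simp [bp, stepA, hc]
  | case3 a b t hc ih =>
      obtain ⟨ha, hb⟩ := hc; subst ha; subst hb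
      have hL : bp (("." :: "O" :: t) ++ [y]) = "O" :: bp ("." :: (t ++ [y])) := by
        simp [bp]
      rw [hL]
      simp only [List.length_cons, Nat.add_sub_cancel, List.cons_append]
      rw [stepA_cons]
      congr 1
      simpa using ih (by simp)
  | case4 a b t hc ih =>
      have hL : bp ((a :: b :: t) ++ [y]) = a :: bp ((b :: t) ++ [y]) := by
        simp only [List.cons_append, bp, if_neg hc]
      rw [hL]
      simp only [List.length_cons, Nat.add_sub_cancel, List.cons_append]
      rw [stepA_cons]
      congr 1
      simpa using ih (by simp)

-- one indexed bubble pass over range m equals structural bp on the (m+1)-prefix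
theorem pass_eq (m : Nat) (r : List String) :
    (List.range m).foldl stepA r = bp (r.take (m + 1)) ++ r.drop (m + 1) := by
  induction m generalizing r with
  | zero =>
      cases r with
      | nil => simp [bp]
      | cons c t => simp [bp]
  | succ m ih =>
      rw [List.range_succ, List.foldl_append, List.foldl_cons, List.foldl_nil, ih]
      rcases hd : r.drop (m + 1) with _ | ⟨y, rest⟩
      · have hlen : r.length ≤ m + 1 := by
          have := List.drop_eq_nil_iff.mp hd; omega
        have ht1 : r.take (m + 1) = r := List.take_of_length_le hlen
        have ht2 : r.take (m + 2) = r := List.take_of_length_le (by omega)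
        have hd2 : r.drop (m + 2) = [] := List.drop_eq_nil_iff.mpr (by omega)
        rw [ht1, ht2, hd2]
        simp only [List.append_nil]
        exact stepA_oob _ _ (by rw [bp_length]; omega)
      · have hlen : m + 2 ≤ r.length := by
          by_contra hcon
          push_neg at hcon
          have hnil : r.drop (m + 1) = [] := List.drop_eq_nil_iff.mpr (by omega)
          rw [hnil] at hd
          simp at hd
        have htk : (r.take (m + 1)).length = m + 1 := by
          simp [List.length_take]; omega
        have ht2 : r.take (m + 2) = r.take (m + 1) ++ [y] := by
          rw [show m + 2 = (m + 1) + 1 by rfl, List.take_add, hd]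
          simp
        have hd2 : r.drop (m + 2) = rest := by
          rw [show m + 2 = (m + 1) + 1 by rfl, ← List.drop_drop, hd]
          simp
        rw [ht2, hd2]
        have hstep : stepA (bp (r.take (m + 1)) ++ y :: rest) m
            = stepA (bp (r.take (m + 1)) ++ [y]) m ++ rest := by
          rw [show bp (r.take (m + 1)) ++ y :: rest = (bp (r.take (m + 1)) ++ [y]) ++ rest by simp]
          exact stepA_append _ _ _ (by simp [bp_length, htk])
        have hbs := bp_snoc (r.take (m + 1)) y (by intro hn; rw [hn] at htk; simp at htk)
        rw [htk] at hbs
        simp only [Nat.add_sub_cancel] at hbs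
        rw [hstep, ← hbs]

-- the shrinking outer passes as structural recursion
def V : Nat → List String → List String
  | 0, r => r
  | k + 1, r => V k (bp (r.take (k + 1)) ++ r.drop (k + 1))

theorem V_append (k : Nat) (u v : List String) (h : k ≤ u.length) :
    V k (u ++ v) = V k u ++ v := by
  induction k generalizing u with
  | zero => simp [V]
  | succ k ih =>
      simp only [V]
      rw [List.take_append_of_le_length (by omega), List.drop_append_of_le_length (by omega)]
      rw [show bp (u.take (k + 1)) ++ (u.drop (k + 1) ++ v)
            = (bp (u.take (k + 1)) ++ u.drop (k + 1)) ++ v by simp]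
      exact ih _ (by simp [bp_length, List.length_take]; omega)

theorem insertDot_O (u : List String) : insertDot ("O" :: u) = "O" :: insertDot u := by
  simp [insertDot]

theorem insertDot_all (u : List String) : (insertDot u).all (· == "O") = false := by
  induction u with
  | nil => simp [insertDot]
  | cons c u ih =>
      by_cases hc : c = "O"
      · subst hc; simp [insertDot, ih]
      · simp [insertDot, hc]

theorem saltR_all (l : List String) : (saltR l).all (· == "O") = l.all (· == "O") := by
  induction l with
  | nil => rfl
  | cons c t ih =>
      by_cases h1 : c = "O"
      · subst h1; simp [saltR, ih]
      · by_cases h2 : c = "."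
        · subst h2
          simp [saltR, insertDot_all]
        · simp [saltR, h1, h2, ih]

theorem insertDot_snoc (v : List String) (y : String) :
    (v.all (· == "O") = false ∨ y ≠ "O") →
    insertDot (v ++ [y]) = insertDot v ++ [y] := by
  induction v with
  | nil =>
      intro h
      rcases h with h | h
      · simp at h
      · simp [insertDot, h]
  | cons c v ih =>
      intro h
      by_cases hc : c = "O"
      · subst hc
        have h' : v.all (· == "O") = false ∨ y ≠ "O" := by
          rcases h with h | h
          · left; simpa using h
          · exact Or.inr h
        have hstep : insertDot (("O" :: v) ++ [y]) = "O" :: insertDot (v ++ [y]) := by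
          simp [insertDot]
        rw [hstep, ih h', insertDot_O]
        rfl
      · simp [insertDot, hc]

theorem saltR_O (t : List String) : saltR ("O" :: t) = "O" :: saltR t := by simp [saltR]
theorem saltR_dot (t : List String) : saltR ("." :: t) = insertDot (saltR t) := by simp [saltR]
theorem saltR_bar (c : String) (t : List String) (h1 : c ≠ "O") (h2 : c ≠ ".") :
    saltR (c :: t) = c :: saltR t := by simp [saltR, h1, h2]

-- bubbling one pass preserves the normal form
theorem saltR_bp (l : List String) : saltR (bp l) = saltR l := by
  fun_induction bp l with
  | case1 => rfl
  | case2 a => rfl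
  | case3 a b t hc ih =>
      obtain ⟨ha, hb⟩ := hc
      subst ha; subst hb
      simp [saltR_O, saltR_dot, insertDot_O, ih]
  | case4 a b t hc ih =>
      by_cases h1 : a = "O"
      · subst h1; rw [saltR_O, ih, saltR_O]
      · by_cases h2 : a = "."
        · subst h2; rw [saltR_dot, ih, saltR_dot]
        · rw [saltR_bar _ _ h1 h2, ih, saltR_bar _ _ h1 h2]

-- the last element of a bubbled pass can be split off the normal form
theorem bp_last (l : List String) : ∀ u y, bp l = u ++ [y] → saltR l = saltR u ++ [y] := by
  fun_induction bp l with
  | case1 =>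
      intro u y h
      simp at h
  | case2 a =>
      intro u y h
      cases u with
      | nil =>
          simp at h
          subst h
          by_cases h1 : a = "O"
          · subst h1; simp [saltR]
          · by_cases h2 : a = "."
            · subst h2; simp [saltR, insertDot]
            · simp [saltR, h1, h2]
      | cons c u' =>
          exfalso
          have hlen := congrArg List.length h
          simp at hlen
  | case3 a b t hc ih =>
      intro u y h
      obtain ⟨ha, hb⟩ := hc
      subst ha; subst hb
      cases u with
      | nil =>
          exfalso
          have hlen := congrArg List.length h
          simp [bp_length] at hlen
      | cons c u' =>
          simp at h
          obtain ⟨hcO, hrest⟩ := h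
          subst hcO
          rw [saltR_dot, saltR_O, insertDot_O, ← saltR_dot, ih u' y hrest, saltR_O]
          simp
  | case4 a b t hc ih =>
      intro u y h
      cases u with
      | nil =>
          exfalso
          have hlen := congrArg List.length h
          simp [bp_length] at hlen
      | cons c u' =>
          simp at h
          obtain ⟨hca, hrest⟩ := h
          subst hca
          have hrec := ih u' y hrest
          by_cases h1 : a = "O"
          · subst h1; rw [saltR_O, hrec, saltR_O]; simp
          · by_cases h2 : a = "."
            · subst h2
              have hbO : b ≠ "O" := fun hb => hc ⟨rfl, hb⟩
              rw [saltR_dot, hrec, saltR_dot, insertDot_snoc]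
              have hall : (saltR u' ++ [y]).all (· == "O") = false := by
                rw [← hrec, saltR_all]
                simp [hbO]
              simp only [List.all_append] at hall
              rcases Bool.and_eq_false_iff.mp hall with h | h
              · exact Or.inl h
              · right; simp at h; exact h
            · rw [saltR_bar _ _ h1 h2, hrec, saltR_bar _ _ h1 h2]; simp

theorem V_eq_saltR (k : Nat) (r : List String) (h : r.length ≤ k) : V k r = saltR r := by
  induction k generalizing r with
  | zero =>
      have : r = [] := List.eq_nil_of_length_eq_zero (by omega)
      subst this; rfl
  | succ k ih =>
      have htk : r.take (k + 1) = r := List.take_of_length_le h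
      have hdp : r.drop (k + 1) = [] := List.drop_eq_nil_iff.mpr h
      simp only [V, htk, hdp, List.append_nil]
      by_cases hk : r.length ≤ k
      · rw [ih _ (by rw [bp_length]; omega), saltR_bp]
      · have hlen : r.length = k + 1 := by omega
        have hne : bp r ≠ [] := bp_ne_nil _ (by intro hn; subst hn; simp at hlen)
        have hdecomp : (bp r).dropLast ++ [(bp r).getLast hne] = bp r :=
          List.dropLast_append_getLast hne
        have hulen : (bp r).dropLast.length = k := by
          simp [List.length_dropLast, bp_length, hlen]
        rw [← hdecomp, V_append _ _ _ (by omega), ih _ (by omega)]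
        exact (bp_last r _ _ hdecomp.symm).symm

-- the outer loop of A, re-indexed: remaining k iterations are range' (n-k) k
theorem fold_pass (n : Nat) : ∀ k, k ≤ n → ∀ r : List String,
    (List.range' (n - k) k).foldl
      (fun r i => (List.range (n - i - 1)).foldl stepA r) r = V k r := by
  intro k
  induction k with
  | zero => intro _ r; simp [V]
  | succ k ih =>
      intro hk r
      rw [List.range'_succ, List.foldl_cons]
      have h1 : n - (n - (k + 1)) - 1 = k := by omega
      have h2 : n - (k + 1) + 1 = n - k := by omega
      rw [h1, h2, pass_eq, ih (by omega)]
      rfl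

theorem iterDot_cons_O (d : Nat) (u : List String) :
    iterDot d ("O" :: u) = "O" :: iterDot d u := by
  induction d with
  | zero => rfl
  | succ d ih =>
      show insertDot (iterDot d ("O" :: u)) = "O" :: insertDot (iterDot d u)
      rw [ih, insertDot_O]

theorem iterDot_rep_nil (d : Nat) : iterDot d [] = List.replicate d "." := by
  induction d with
  | zero => rfl
  | succ d ih =>
      show insertDot (iterDot d []) = List.replicate (d + 1) "."
      rw [ih]
      cases d with
      | zero => rfl
      | succ d' => simp [insertDot, List.replicate_succ]

theorem iterDot_cons_ne (d : Nat) (c : String) (u : List String) (h : c ≠ "O") :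
    iterDot d (c :: u) = List.replicate d "." ++ c :: u := by
  induction d with
  | zero => rfl
  | succ d ih =>
      show insertDot (iterDot d (c :: u)) = List.replicate (d + 1) "." ++ c :: u
      rw [ih]
      cases d with
      | zero => simp [insertDot, h]
      | succ d' => simp [insertDot, List.replicate_succ]

theorem iterDot_comm (d : Nat) (u : List String) :
    insertDot (iterDot d u) = iterDot d (insertDot u) := by
  induction d generalizing u with
  | zero => rfl
  | succ d ih =>
      show insertDot (insertDot (iterDot d u)) = insertDot (iterDot d (insertDot u))
      rw [ih]

-- B's fold, generalized over its running state, computes the normal form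
theorem gB_fold (r : List String) : ∀ (out : List String) (o d : Nat),
    (r.foldl gB (out, o, d)).1 ++ List.replicate (r.foldl gB (out, o, d)).2.1 "O"
      ++ List.replicate (r.foldl gB (out, o, d)).2.2 "."
    = out ++ List.replicate o "O" ++ iterDot d (saltR r) := by
  induction r with
  | nil =>
      intro out o d
      simp only [List.foldl_nil]
      rw [show saltR [] = [] from rfl, iterDot_rep_nil]
  | cons c t ih =>
      intro out o d
      by_cases h1 : c = "O"
      · subst h1
        rw [List.foldl_cons, show gB (out, o, d) "O" = (out, o + 1, d) by simp [gB], ih,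
          saltR_O, iterDot_cons_O,
          show List.replicate (o + 1) "O" = List.replicate o "O" ++ ["O"] by
            rw [List.replicate_succ']]
        simp
      · by_cases h2 : c = "."
        · subst h2
          rw [List.foldl_cons, show gB (out, o, d) "." = (out, o, d + 1) by simp [gB], ih,
            saltR_dot, show iterDot (d + 1) (saltR t) = insertDot (iterDot d (saltR t)) from rfl,
            iterDot_comm]
        · rw [List.foldl_cons, show gB (out, o, d) c
              = (out ++ List.replicate o "O" ++ List.replicate d "." ++ [c], 0, 0) by
                simp [gB, h1, h2], ih,
            saltR_bar _ _ h1 h2, iterDot_cons_ne _ _ _ h1]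
          simp [iterDot]

theorem alt_eq_saltR (r : List String) : shift_line_alt r = saltR r := by
  have := gB_fold r [] 0 0
  simpa [shift_line_alt, iterDot] using this

-- ===== VERDICT (by name: the statement is the Claim_ definition above) =====
theorem shift_line_spec : Claim_equal_shift_line := by
  intro row _
  show shift_line row = shift_line_alt row
  have hmain : shift_line row = V row.length row := by
    show (List.range row.length).foldl
        (fun r i => (List.range (row.length - i - 1)).foldl (fun r j => stepA r j) r) row
      = V row.length row
    rw [List.range_eq_range']
    have := fold_pass row.length row.length (le_refl _) row
    rw [Nat.sub_self] at this
    exact this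
  rw [hmain, V_eq_saltR _ _ (le_refl _), alt_eq_saltR]
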